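-- pv_equiv track=rewrite | github.com/jzaia18/SimplexSolver | gen_matrix.py | buildmatrix_nzs
-- ===== SOURCE A (Python) =====
-- def buildmatrix_nzs(rows, cols, args):
--     if len(args) != rows*cols*2:
--         raise Exception(f"Incorrect number of args provided! Expected {rows*cols*2} and got {len(args)}")
--     mat = []
--
--     for i in range(rows):
--         row = []
--         for ii in range(0,cols*2,2):
--             row.append((args[(i*cols*2)+ii],args[(i*cols*2)+ii+1]))
--
--         mat.append(row)
--     return mat
-- ===== SOURCE B (Python) =====
-- def buildmatrix_nzs(rows, cols, args):
--     if len(args) != rows*cols*2: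
--         raise Exception(f"Incorrect number of args provided! Expected {rows*cols*2} and got {len(args)}")
--     pairs = [(args[j], args[j+1]) for j in range(0, len(args), 2)]
--     return [pairs[i*cols:(i+1)*cols] for i in range(rows)]
-- ===== Notes on version B (the rewrite author's own statement) =====
-- stated objective: alternative
-- what changed: Replaces A's nested index-arithmetic loops with a two-pass decomposition: first pair up consecutive args by stepping two at a time, then slice the pair list into rows chunks of cols pairs.
import Mathlib
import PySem

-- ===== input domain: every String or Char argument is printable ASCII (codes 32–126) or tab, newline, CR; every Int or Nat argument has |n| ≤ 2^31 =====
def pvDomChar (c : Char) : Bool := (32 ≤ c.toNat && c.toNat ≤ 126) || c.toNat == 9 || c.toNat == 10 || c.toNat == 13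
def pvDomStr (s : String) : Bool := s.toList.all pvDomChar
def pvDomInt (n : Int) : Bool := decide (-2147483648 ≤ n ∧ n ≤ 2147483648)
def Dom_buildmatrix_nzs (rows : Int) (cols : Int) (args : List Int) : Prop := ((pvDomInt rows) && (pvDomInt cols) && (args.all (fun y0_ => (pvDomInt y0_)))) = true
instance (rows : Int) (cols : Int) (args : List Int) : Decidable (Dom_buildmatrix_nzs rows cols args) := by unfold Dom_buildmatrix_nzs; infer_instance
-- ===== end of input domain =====

-- B changes the decomposition: pair consecutive args in one pass, then slice the pair
-- list into row chunks, instead of A's nested loops with index arithmetic (alternative).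

-- ===== PORT A =====
-- Indexing uses pyGetD: under Pre_ every index A computes is in range, so no IndexError occurs.
def buildmatrix_nzs (rows : Int) (cols : Int) (args : List Int) : List (List (Int × Int)) :=
  (PySem.List.pyRange 0 rows 1).foldl (fun mat i =>
    mat ++ [(PySem.List.pyRange 0 (cols*2) 2).foldl (fun row ii =>
      row ++ [(PySem.List.pyGetD args (i*cols*2+ii) 0,
               PySem.List.pyGetD args (i*cols*2+ii+1) 0)]) []]) []

-- ===== PORT B =====
def buildmatrix_nzs_alt (rows : Int) (cols : Int) (args : List Int) : List (List (Int × Int)) :=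
  let pairs := (PySem.List.pyRange 0 (args.length : Int) 2).map (fun j =>
    (PySem.List.pyGetD args j 0, PySem.List.pyGetD args (j+1) 0))
  (PySem.List.pyRange 0 rows 1).map (fun i =>
    PySem.List.slice pairs (some (i*cols)) (some ((i+1)*cols)))

-- ===== PRECONDITION & SPEC =====
-- Pre_ excludes exactly the inputs on which A raises its explicit Exception
-- (len(args) != rows*cols*2); A returns on every other input.
def Pre_buildmatrix_nzs (rows : Int) (cols : Int) (args : List Int) : Prop :=
  (args.length : Int) = rows * cols * 2
instance (rows : Int) (cols : Int) (args : List Int) : Decidable (Pre_buildmatrix_nzs rows cols args) := by unfold Pre_buildmatrix_nzs; infer_instance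

def pvWitness_buildmatrix_nzs : Int × Int × List Int := (2, 2, [1, 2, 3, 4, 5, 6, 7, 8])

def Spec_buildmatrix_nzs (rows : Int) (cols : Int) (args : List Int) (out : List (List (Int × Int))) : Prop := out = buildmatrix_nzs_alt rows cols args
instance (rows : Int) (cols : Int) (args : List Int) (out : List (List (Int × Int))) : Decidable (Spec_buildmatrix_nzs rows cols args out) := by unfold Spec_buildmatrix_nzs; infer_instance

-- ===== CLAIM (what is proved, stated in full; the proofs are below) =====
def Claim_equal_buildmatrix_nzs : Prop := ∀ (rows : Int) (cols : Int) (args : List Int), Dom_buildmatrix_nzs rows cols args → Pre_buildmatrix_nzs rows cols args → Spec_buildmatrix_nzs rows cols args (buildmatrix_nzs rows cols args)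

-- ===== LEMMAS AND PROOFS =====

-- range(0, 2*C, 2) is the doubles of range(C)
theorem pyRange_two (C : Nat) :
    PySem.List.pyRange 0 (2 * (C : Int)) 2 = (List.range C).map (fun k : Nat => 2 * (k : Int)) := by
  rw [PySem.List.pyRange_of_pos (a := 0) (b := 2 * (C : Int)) (by norm_num)]
  rcases Nat.eq_zero_or_pos C with h | h
  · subst h; simp
  · have hlt : (0 : Int) < 2 * (C : Int) := by positivity
    rw [if_pos hlt]
    have : ((2 * (C : Int) - 0 + 2 - 1) / 2).toNat = C := by omega
    rw [this]
    exact List.map_congr_left (by intro a _; simp)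

-- variant of pyRange_two with the literal shape 'C * 2' appearing in the port of A
theorem pyRange_two' (C : Nat) :
    PySem.List.pyRange 0 ((C : Int) * 2) 2 = (List.range C).map (fun k : Nat => 2 * (k : Int)) := by
  rw [show ((C : Int) * 2) = 2 * (C : Int) by ring, pyRange_two]

theorem buildmatrix_nzs_spec_aux (rows cols : Int) (args : List Int)
    (hpre : (args.length : Int) = rows * cols * 2) :
    buildmatrix_nzs rows cols args = buildmatrix_nzs_alt rows cols args := by
  unfold buildmatrix_nzs buildmatrix_nzs_alt
  simp only [PySem.List.foldl_append_singleton_eq_map, List.nil_append]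
  by_cases hr : rows ≤ 0
  · rw [PySem.List.pyRange_one_eq_nil hr]; simp
  replace hr : 0 < rows := by omega
  -- rows > 0, hence cols ≥ 0
  have hc : 0 ≤ cols := by nlinarith [hpre, Int.natCast_nonneg args.length]
  obtain ⟨R, hR⟩ : ∃ R : Nat, rows = (R : Int) := ⟨rows.toNat, by omega⟩
  obtain ⟨C, hC⟩ : ∃ C : Nat, cols = (C : Int) := ⟨cols.toNat, by omega⟩
  subst hR hC
  have hlen : args.length = R * C * 2 := by exact_mod_cast hpre
  apply List.map_congr_left
  intro i hi
  rw [PySem.List.mem_pyRange_one] at hi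
  obtain ⟨n, hn⟩ : ∃ n : Nat, i = (n : Int) := ⟨i.toNat, by omega⟩
  subst hn
  have hnR : n < R := by exact_mod_cast hi.2
  -- rewrite all step-2 ranges
  have hargs : (args.length : Int) = 2 * ((R * C : Nat) : Int) := by push_cast [hlen]; ring
  rw [hargs, pyRange_two, pyRange_two' C]
  -- rewrite the slice with natural bounds
  have h1 : (n : Int) * (C : Int) = ((n * C : Nat) : Int) := by push_cast; ring
  have h2 : ((n : Int) + 1) * (C : Int) = ((n * C + C : Nat) : Int) := by push_cast; ring
  rw [h1, h2, PySem.List.slice_natCast]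
  -- compare elementwise
  apply List.ext_getElem
  · have hle : n * C + C ≤ R * C := by
      calc n * C + C = (n + 1) * C := by ring
        _ ≤ R * C := Nat.mul_le_mul_right C (by omega)
      
    simp only [List.length_map, List.length_range, List.length_take, List.length_drop]
    have h3 : n * C + C - n * C = C := by omega
    have h4 : C ≤ R * C - n * C := by omega
    rw [h3, Nat.min_eq_left h4]
  · intro k hk hk'
    simp only [List.getElem_map, List.getElem_range, List.getElem_take, List.getElem_drop]
    have hk1 : k < C := by simpa using hk
    have hidx : n * C + k < R * C := by
      calc n * C + k < n * C + C := by omega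
        _ = (n + 1) * C := by ring
        _ ≤ R * C := Nat.mul_le_mul_right C (by omega)
    have e1 : ((n * C : Nat) : Int) * 2 + 2 * (k : Int) = 2 * ((n * C + k : Nat) : Int) := by
      push_cast; ring
    rw [e1]

-- ===== VERDICT (by name: the statement is the Claim_ definition above) =====
theorem buildmatrix_nzs_spec : Claim_equal_buildmatrix_nzs := by
  intro rows cols args _ hpre
  exact buildmatrix_nzs_spec_aux rows cols args hpre
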